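-- pv_equiv track=rewrite | github.com/Vikasbazarla/chief-complaint-classification | src/preprocessing.py | normalize_body_parts
-- ===== SOURCE A (Python) =====
-- STRIP_CHARS = ".,;:-()[]\"'`"
--
-- body_part_map = {
--     "b/l": "bilateral",
--     "bil": "bilateral",
--     "rt": "right",
--     "lt": "left",
--     "lf": "left",
--     "rta": "road traffic accident",
-- }
--
-- def normalize_body_parts(tokens):
--     normalized = []
--     i = 0
--     while i < len(tokens):
--         token = tokens[i]
--         clean_token = token.lower().strip(STRIP_CHARS)
--         if clean_token == "b/l" or (clean_token == "b" and i + 1 < len(tokens) and tokens[i + 1].lower().strip(STRIP_CHARS) == "l"):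
--             normalized.append("bilateral")
--             if clean_token == "b":
--                 i += 2
--             else:
--                 i += 1
--         elif clean_token in body_part_map:
--             normalized.append(body_part_map[clean_token])
--             i += 1
--         else:
--             normalized.append(token)
--             i += 1
--     return normalized
-- ===== SOURCE B (Python) =====
-- STRIP_CHARS = ".,;:-()[]\"'`"
--
-- body_part_map = {
--     "b/l": "bilateral",
--     "bil": "bilateral",
--     "rt": "right",
--     "lt": "left",
--     "lf": "left",
--     "rta": "road traffic accident",
-- }
--
-- def _clean(token):
--     return token.lower().strip(STRIP_CHARS)
--
-- def normalize_body_parts(tokens):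
--     # Pass 1: merge a 'b' token followed by an 'l' token into the literal 'bilateral'.
--     merged = []
--     i = 0
--     n = len(tokens)
--     while i < n:
--         if _clean(tokens[i]) == "b" and i + 1 < n and _clean(tokens[i + 1]) == "l":
--             merged.append("bilateral")
--             i += 2
--         else:
--             merged.append(tokens[i])
--             i += 1
--     # Pass 2: dictionary-normalize each remaining token.
--     return [body_part_map.get(_clean(t), t) for t in merged]
-- ===== Notes on version B (the rewrite author's own statement) =====
-- stated objective: simpler
-- what changed: A's single index-walking while loop with a combined merge-or-lookup branch is decomposed into two sequential passes: pass 1 only merges a 'b' token followed by an 'l' token into the literal 'bilateral', pass 2 is a plain per-token dictionary-normalize map.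
import Mathlib
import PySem

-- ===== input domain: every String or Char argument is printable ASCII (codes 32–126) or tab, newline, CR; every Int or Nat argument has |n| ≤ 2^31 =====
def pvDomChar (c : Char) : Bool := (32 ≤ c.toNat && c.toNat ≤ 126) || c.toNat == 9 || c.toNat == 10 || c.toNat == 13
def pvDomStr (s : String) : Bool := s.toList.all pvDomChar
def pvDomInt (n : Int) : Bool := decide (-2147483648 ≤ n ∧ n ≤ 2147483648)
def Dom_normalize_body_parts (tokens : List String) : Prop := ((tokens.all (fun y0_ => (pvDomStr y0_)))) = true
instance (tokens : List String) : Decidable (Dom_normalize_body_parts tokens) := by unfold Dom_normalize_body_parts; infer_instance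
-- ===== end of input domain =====

-- B splits A's single index loop into two passes: a merge pass ('b' + 'l' → "bilateral")
-- followed by a plain dictionary-normalize map; objective: simpler decomposition, same cost.

-- shared module constants (both Pythons use the same STRIP_CHARS and body_part_map)
def pvStripChars : String := ".,;:-()[]\"'`"

def pvBodyPartMap : PySem.Dict String String :=
  PySem.Dict.ofList [("b/l", "bilateral"), ("bil", "bilateral"), ("rt", "right"),
                     ("lt", "left"), ("lf", "left"), ("rta", "road traffic accident")]

-- token.lower().strip(STRIP_CHARS)
def pvClean (t : String) : String := PySem.Str.stripChars (PySem.Str.lower t) pvStripChars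

-- ===== PORT A =====
-- A's while loop as recursion on the remaining token list; the lookahead
-- 'i + 1 < len(tokens)' becomes the case split on the rest of the list.
def pvGoA : List String → List String
  | [] => []
  | t :: rest =>
    match rest with
    | l :: rest' =>
      if pvClean t = "b/l" ∨ (pvClean t = "b" ∧ pvClean l = "l") then
        if pvClean t = "b" then "bilateral" :: pvGoA rest'  -- i += 2
        else "bilateral" :: pvGoA (l :: rest')              -- i += 1
      else
        match pvBodyPartMap.get? (pvClean t) with
        | some v => v :: pvGoA (l :: rest')
        | none => t :: pvGoA (l :: rest')
    | [] =>                                                 -- last token: no lookahead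
      if pvClean t = "b/l" then ["bilateral"]
      else
        match pvBodyPartMap.get? (pvClean t) with
        | some v => [v]
        | none => [t]

def normalize_body_parts (tokens : List String) : List String := pvGoA tokens

-- ===== PORT B =====
-- pass 1: merge a 'b' token followed by an 'l' token into the literal "bilateral"
def pvMerge : List String → List String
  | [] => []
  | t :: rest =>
    match rest with
    | l :: rest' =>
      if pvClean t = "b" ∧ pvClean l = "l" then "bilateral" :: pvMerge rest'
      else t :: pvMerge (l :: rest')
    | [] => [t]

-- pass 2: body_part_map.get(clean(t), t) for each merged token
def normalize_body_parts_alt (tokens : List String) : List String :=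
  (pvMerge tokens).map (fun t => pvBodyPartMap.getD (pvClean t) t)

-- ===== PRECONDITION & SPEC =====
def Spec_normalize_body_parts (tokens : List String) (out : List String) : Prop := out = normalize_body_parts_alt tokens
instance (tokens : List String) (out : List String) : Decidable (Spec_normalize_body_parts tokens out) := by unfold Spec_normalize_body_parts; infer_instance

-- ===== CLAIM (what is proved, stated in full; the proofs are below) =====
def Claim_equal_normalize_body_parts : Prop := ∀ (tokens : List String), Dom_normalize_body_parts tokens → Spec_normalize_body_parts tokens (normalize_body_parts tokens)

-- ===== LEMMAS AND PROOFS =====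

-- unfolding equations (definitional)
theorem pvGoA_two (t l : String) (rest : List String) :
    pvGoA (t :: l :: rest) =
      if pvClean t = "b/l" ∨ (pvClean t = "b" ∧ pvClean l = "l") then
        if pvClean t = "b" then "bilateral" :: pvGoA rest
        else "bilateral" :: pvGoA (l :: rest)
      else
        match pvBodyPartMap.get? (pvClean t) with
        | some v => v :: pvGoA (l :: rest)
        | none => t :: pvGoA (l :: rest) := rfl

theorem pvGoA_one (t : String) :
    pvGoA [t] =
      if pvClean t = "b/l" then ["bilateral"]
      else
        match pvBodyPartMap.get? (pvClean t) with
        | some v => [v]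
        | none => [t] := rfl

theorem pvMerge_one (t : String) : pvMerge [t] = [t] := rfl

theorem pvMerge_two (t l : String) (rest : List String) :
    pvMerge (t :: l :: rest) =
      if pvClean t = "b" ∧ pvClean l = "l" then "bilateral" :: pvMerge rest
      else t :: pvMerge (l :: rest) := rfl

-- "bilateral" cleans to itself and is not a key of the map
theorem pvF_bilateral : pvBodyPartMap.getD (pvClean "bilateral") "bilateral" = "bilateral" := by
  decide

-- a token cleaning to "b/l" is normalized to "bilateral" by the dictionary
theorem pvF_bl (t : String) (h : pvClean t = "b/l") :
    pvBodyPartMap.getD (pvClean t) t = "bilateral" := by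
  rw [h]
  have hv : pvBodyPartMap.get? "b/l" = some "bilateral" := by decide
  simp [PySem.Dict.getD, hv]

theorem pvBL_ne_b (t : String) (h : pvClean t = "b/l") : ¬ pvClean t = "b" := by
  rw [h]; decide

theorem pvGoA_eq_alt : ∀ (tokens : List String),
    pvGoA tokens = (pvMerge tokens).map (fun t => pvBodyPartMap.getD (pvClean t) t) := by
  intro tokens
  induction tokens using pvMerge.induct with
  | case1 => rfl
  | case2 t l rest h ih =>
    -- merge case: clean t = "b", clean l = "l"
    rw [pvGoA_two, pvMerge_two, if_pos h, if_pos (Or.inr h), if_pos h.1,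
      List.map_cons, pvF_bilateral, ih]
  | case3 t l rest h ih =>
    -- no merge: either a "b/l" token, a dictionary token, or unchanged
    rw [pvGoA_two, pvMerge_two, if_neg h, List.map_cons]
    by_cases hbl : pvClean t = "b/l"
    · rw [if_pos (Or.inl hbl), if_neg (pvBL_ne_b t hbl), ih, pvF_bl t hbl]
    · rw [if_neg (by rintro (h' | h'); exact hbl h'; exact h h')]
      cases hv : pvBodyPartMap.get? (pvClean t) with
      | none => simp [hv, ih, PySem.Dict.getD]
      | some v => simp [hv, ih, PySem.Dict.getD]
  | case4 t =>
    -- single trailing token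
    rw [pvGoA_one]
    by_cases hbl : pvClean t = "b/l"
    · rw [if_pos hbl, pvMerge_one, List.map_cons, List.map_nil, pvF_bl t hbl]
    · rw [if_neg hbl]
      cases hv : pvBodyPartMap.get? (pvClean t) with
      | none => simp [hv, pvMerge_one, PySem.Dict.getD]
      | some v => simp [hv, pvMerge_one, PySem.Dict.getD]

-- ===== VERDICT (by name: the statement is the Claim_ definition above) =====
theorem normalize_body_parts_spec : Claim_equal_normalize_body_parts := by
  intro tokens _
  unfold Spec_normalize_body_parts normalize_body_parts normalize_body_parts_alt
  exact pvGoA_eq_alt tokens
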